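-- pv_equiv track=rewrite | github.com/pushpendra2607/Python-lab | largest.py | largestSubmatrix
-- ===== SOURCE A (Python) =====
-- from typing import List
--
-- def largestSubmatrix(matrix: List[List[int]]) -> int:
--     m=len(matrix)
--     n=len(matrix[0])
--     for i in range (1,m):
--         for j in range(n):
--             if matrix[i][j]==1:
--                 matrix[i][j]+=matrix[i-1][j]
--     ans=0
--     for row in matrix:
--         sorted_row=sorted(row,reverse=True)
--         for i in range (n ):
--             area=sorted_row[i]*(i+1)
--             ans=max(ans,area)
--     return ans
-- ===== SOURCE B (Python) =====
-- from typing import List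
--
-- def largestSubmatrix(matrix: List[List[int]]) -> int:
--     # Sort-free: carry the column heights across rows functionally and score each
--     # height x directly by counting how many columns are at least as tall.
--     heights = [0] * len(matrix[0])
--     best = 0
--     for row in matrix:
--         heights = [v + h if v == 1 else v for v, h in zip(row, heights)]
--         for x in heights:
--             best = max(best, x * sum(1 for y in heights if y >= x))
--     return best
-- ===== Notes on version B (the rewrite author's own statement) =====
-- stated objective: alternative
-- what changed: B drops A's in-place mutation and per-row descending sort entirely: it carries the column heights functionally and scores each height x directly as x times the number of columns at least x tall (pairwise counting instead of sort-then-rank); Pre_ admits rectangular and zero-width matrices, since on the remaining ragged inputs A either raises IndexError (a later row shorter than the first) or its result depends on surplus entries of longer rows being sorted in unaccumulated, an accident of the implementation.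
-- outside the precondition, e.g. on largestSubmatrix([[1], [0, 5]]): A returns 5, B returns 1; on largestSubmatrix([[1, 1], [1]]): A raises IndexError, B returns 2
import Mathlib
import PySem

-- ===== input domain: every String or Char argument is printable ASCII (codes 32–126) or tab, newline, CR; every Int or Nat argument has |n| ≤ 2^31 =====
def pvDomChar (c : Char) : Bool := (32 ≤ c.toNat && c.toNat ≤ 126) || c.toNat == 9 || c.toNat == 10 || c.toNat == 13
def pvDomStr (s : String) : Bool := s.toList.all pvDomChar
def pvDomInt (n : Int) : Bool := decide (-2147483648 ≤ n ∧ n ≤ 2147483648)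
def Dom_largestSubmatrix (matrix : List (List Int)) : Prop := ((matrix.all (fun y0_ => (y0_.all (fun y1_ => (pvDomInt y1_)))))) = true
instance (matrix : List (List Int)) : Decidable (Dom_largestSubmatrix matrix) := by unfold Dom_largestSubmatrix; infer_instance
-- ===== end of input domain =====

-- B replaces A's in-place mutation and per-row descending sort with a sort-free pass:
-- heights are carried functionally and each height x is scored as x * #(columns ≥ x).
-- A mutates its argument in place; the equivalence is about the RETURN value only.

-- ===== PORT A =====
-- body of the mutation loop 'for j in range(n): if matrix[i][j]==1: matrix[i][j]+=matrix[i-1][j]':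
-- positions j < n are written, the rest of the row is left unchanged
def rowUpdA (n : Nat) (prev row : List Int) : List Int :=
  ((List.range n).map (fun (j : Nat) =>
    if PySem.List.pyGetD row ((j : Nat) : Int) 0 == 1
    then PySem.List.pyGetD row ((j : Nat) : Int) 0 + PySem.List.pyGetD prev ((j : Nat) : Int) 0
    else PySem.List.pyGetD row ((j : Nat) : Int) 0)) ++ row.drop n

-- the mutation loop 'for i in range(1,m)': each row updated in order from the previous updated
-- row (row i only reads row i-1, so carrying the previous row is the in-place update)
def accA (n : Nat) (first : List Int) (rest : List (List Int)) : List (List Int) :=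
  (rest.foldl (fun (st : List Int × List (List Int)) row =>
      let nr := rowUpdA n st.1 row
      (nr, st.2 ++ [nr])) (first, [first])).2

def largestSubmatrix (matrix : List (List Int)) : Int :=
  let n := (matrix.headD []).length
  let acc := match matrix with
    | [] => []
    | r0 :: rest => accA n r0 rest
  acc.foldl (fun ans row =>
    let sorted_row := PySem.List.sorted row (fun x => x) true
    (List.range n).foldl (fun (ans : Int) (i : Nat) =>
      let area := PySem.List.pyGetD sorted_row ((i : Nat) : Int) 0 * (((i : Nat) : Int) + 1)
      max ans area) ans) 0

-- ===== PORT B =====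
-- 'heights = [v + h if v == 1 else v for v, h in zip(row, heights)]'
def hStepB (heights row : List Int) : List Int :=
  (row.zip heights).map (fun vh => if vh.1 == 1 then vh.1 + vh.2 else vh.1)

-- 'for x in heights: best = max(best, x * sum(1 for y in heights if y >= x))'
def bestStepB (best : Int) (heights : List Int) : Int :=
  heights.foldl (fun b x =>
    max b (x * heights.foldl (fun (c : Int) y => if x ≤ y then c + 1 else c) 0)) best

def largestSubmatrix_alt (matrix : List (List Int)) : Int :=
  (matrix.foldl (fun (st : Int × List Int) row =>
      let heights := hStepB st.2 row
      (bestStepB st.1 heights, heights))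
    ((0 : Int), List.replicate (matrix.headD []).length (0 : Int))).1

-- ===== PRECONDITION & SPEC =====
-- Pre_ admits nonempty matrices that are RECTANGULAR or of width zero (empty first row, on
-- which both programs ignore everything): on the remaining ragged inputs A either raises
-- IndexError (a later row shorter than the first) or, on longer rows, its value depends on
-- surplus entries being sorted in without height accumulation — an implementation accident.
def Pre_largestSubmatrix (matrix : List (List Int)) : Prop :=
  matrix ≠ [] ∧ ((matrix.headD []).length = 0 ∨
    ∀ row ∈ matrix, row.length = (matrix.headD []).length)
instance (matrix : List (List Int)) : Decidable (Pre_largestSubmatrix matrix) := by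
  unfold Pre_largestSubmatrix; infer_instance

def pvWitness_largestSubmatrix : List (List Int) := [[1, 0], [1, 1], [0, 1]]

def Spec_largestSubmatrix (matrix : List (List Int)) (out : Int) : Prop := out = largestSubmatrix_alt matrix
instance (matrix : List (List Int)) (out : Int) : Decidable (Spec_largestSubmatrix matrix out) := by unfold Spec_largestSubmatrix; infer_instance

-- ===== CLAIM (what is proved, stated in full; the proofs are below) =====
def Claim_equal_largestSubmatrix : Prop := ∀ (matrix : List (List Int)), Dom_largestSubmatrix matrix → Pre_largestSubmatrix matrix → Spec_largestSubmatrix matrix (largestSubmatrix matrix)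

-- ===== LEMMAS AND PROOFS =====

-- the updated rows, one at a time (proof-side view of accA's accumulator)
def chainA (n : Nat) : List Int → List (List Int) → List (List Int)
  | _, [] => []
  | prev, row :: rest => rowUpdA n prev row :: chainA n (rowUpdA n prev row) rest

lemma accA_aux (n : Nat) (rest : List (List Int)) : ∀ (prev : List Int) (acc : List (List Int)),
    (rest.foldl (fun (st : List Int × List (List Int)) row =>
      let nr := rowUpdA n st.1 row
      (nr, st.2 ++ [nr])) (prev, acc)).2 = acc ++ chainA n prev rest := by
  induction rest with
  | nil => intro prev acc; simp [chainA]
  | cons row rest ih =>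
      intro prev acc
      simp only [List.foldl_cons, chainA]
      rw [ih]
      simp

lemma accA_eq (n : Nat) (first : List Int) (rest : List (List Int)) :
    accA n first rest = first :: chainA n first rest := by
  unfold accA; rw [accA_aux]; simp

lemma length_hStepB (heights row : List Int) (n : Nat)
    (hp : heights.length = n) (hr : row.length = n) : (hStepB heights row).length = n := by
  simp [hStepB, hp, hr]

lemma rowUpdA_eq_hStepB (n : Nat) (prev row : List Int)
    (hp : prev.length = n) (hr : row.length = n) :
    rowUpdA n prev row = hStepB prev row := by
  unfold rowUpdA hStepB
  apply List.ext_getElem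
  · simp [hp, hr]
  · intro j h1 h2
    have hj : j < n := by simp [hr] at h1; omega
    rw [List.getElem_append_left (by simpa using hj), List.getElem_map, List.getElem_map,
      List.getElem_range, List.getElem_zip]
    simp [PySem.List.pyGetD_natCast, List.getD_eq_getElem?_getD,
      List.getElem?_eq_getElem (by omega : j < row.length),
      List.getElem?_eq_getElem (by omega : j < prev.length)]

lemma hStepB_replicate (r0 : List Int) : hStepB (List.replicate r0.length 0) r0 = r0 := by
  induction r0 with
  | nil => rfl
  | cons x t ih =>
      simp only [List.length_cons, List.replicate_succ, hStepB, List.zip_cons_cons,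
        List.map_cons]
      rw [show ((if x == 1 then x + 0 else x) = x) by split <;> omega]
      exact congrArg (x :: ·) ih

lemma countFold (x : Int) (l : List Int) : ∀ c : Int,
    l.foldl (fun (c : Int) y => if x ≤ y then c + 1 else c) c
      = c + (l.countP (fun y => decide (x ≤ y)) : Int) := by
  induction l with
  | nil => intro c; simp
  | cons y t ih =>
      intro c
      simp only [List.foldl_cons, List.countP_cons]
      by_cases h : x ≤ y
      · rw [if_pos h, ih]; simp [h]; ring
      · rw [if_neg h, ih]; simp [h]

lemma foldl_max_le {α : Type} (l : List α) (f : α → Int) (z : Int) :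
    ∀ init : Int, init ≤ z → (∀ x ∈ l, f x ≤ z) →
    l.foldl (fun a x => max a (f x)) init ≤ z := by
  induction l with
  | nil => intro init h0 _; simpa using h0
  | cons x t ih =>
      intro init h0 h
      simp only [List.foldl_cons]
      exact ih _ (max_le h0 (h x (by simp))) (fun y hy => h y (by simp [hy]))

-- a descending-sorted list is entrywise antitone
lemma sorted_desc_getElem_le (s : List Int) (hp : List.Pairwise (fun a b => b ≤ a) s)
    (p q : Nat) (hpq : p ≤ q) (hq : q < s.length) : s[q] ≤ s[p] := by
  rcases Nat.lt_or_ge p q with h | h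
  · exact List.pairwise_iff_getElem.mp hp p q (by omega) hq h
  · have : p = q := by omega
    subst this; exact le_rfl

-- first i+1 entries of a descending-sorted list are all ≥ its (i)-th entry
lemma count_ge_of_sorted_idx (s : List Int) (hp : List.Pairwise (fun a b => b ≤ a) s)
    (i : Nat) (hi : i < s.length) :
    i + 1 ≤ s.countP (fun x => decide (s[i] ≤ x)) := by
  have hlen : (s.take (i+1)).length = i + 1 := by simp; omega
  have hall : ∀ a ∈ s.take (i+1), decide (s[i] ≤ a) = true := by
    intro a ha
    obtain ⟨j, hj, rfl⟩ := List.mem_take_iff_getElem.mp ha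
    have hj' : j < i + 1 := lt_of_lt_of_le hj (min_le_left _ _)
    exact decide_eq_true (sorted_desc_getElem_le s hp j i (by omega) hi)
  calc i + 1 = (s.take (i+1)).countP (fun x => decide (s[i] ≤ x)) := by
        rw [List.countP_eq_length.mpr hall, hlen]
    _ ≤ s.countP (fun x => decide (s[i] ≤ x)) :=
        (List.take_sublist (i+1) s).countP_le

-- the (k-1)-th entry of a descending-sorted list is ≥ h when k = #entries ≥ h > 0
lemma sorted_getElem_count_ge (s : List Int) (hp : List.Pairwise (fun a b => b ≤ a) s)
    (h : Int) (k : Nat) (hk : k = s.countP (fun x => decide (h ≤ x))) (hk0 : 0 < k)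
    (hklen : k - 1 < s.length) :
    h ≤ s[k-1] := by
  by_contra hlt
  rw [not_le] at hlt
  have hdrop : (s.drop (k-1)).countP (fun x => decide (h ≤ x)) = 0 := by
    rw [List.countP_eq_zero]
    intro a ha
    obtain ⟨j, hj, rfl⟩ := List.mem_drop_iff_getElem.mp ha
    have := sorted_desc_getElem_le s hp (k-1) (k-1+j) (by omega) (by omega)
    simp only [decide_eq_true_eq]
    omega
  have hle : s.countP (fun x => decide (h ≤ x)) ≤ k - 1 := by
    conv_lhs => rw [(List.take_append_drop (k-1) s).symm]
    rw [List.countP_append, hdrop]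
    have := List.countP_le_length (l := s.take (k-1)) (p := fun x => decide (h ≤ x))
    have := List.length_take_le (k-1) s
    omega
  omega

-- A's per-row pass, named (the fold function of A's second loop)
def phase2A (n : Nat) (ans : Int) (row : List Int) : Int :=
  let sorted_row := PySem.List.sorted row (fun x => x) true
  (List.range n).foldl (fun (ans : Int) (i : Nat) =>
    let area := PySem.List.pyGetD sorted_row ((i : Nat) : Int) 0 * (((i : Nat) : Int) + 1)
    max ans area) ans

-- B's per-row pass, with the counting fold rewritten as countP
lemma bestStepB_eq_foldl_max (best : Int) (r : List Int) :
    bestStepB best r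
      = r.foldl (fun b x => max b (x * (r.countP (fun y => decide (x ≤ y)) : Int))) best := by
  unfold bestStepB
  have hf : (fun (b x : Int) =>
        max b (x * r.foldl (fun (c : Int) y => if x ≤ y then c + 1 else c) 0))
      = fun (b x : Int) => max b (x * (r.countP (fun y => decide (x ≤ y)) : Int)) := by
    funext b x
    rw [countFold x r 0, zero_add]
  rw [hf]

lemma bestStepB_ge (best : Int) (r : List Int) : best ≤ bestStepB best r := by
  rw [bestStepB_eq_foldl_max]
  exact (PySem.List.le_foldl_max_int r _ best).1

lemma largestSubmatrix_cons_eq (r0 : List Int) (rest : List (List Int)) :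
    largestSubmatrix (r0 :: rest)
      = (r0 :: chainA r0.length r0 rest).foldl (phase2A r0.length) 0 := by
  simp only [largestSubmatrix, List.headD_cons, accA_eq]
  rfl

-- the per-row equivalence: A's sort-then-rank scan equals B's pairwise-counting scan
lemma phase2A_eq_bestStepB (n : Nat) (ans : Int) (r : List Int)
    (h0 : 0 ≤ ans) (hlen_r : r.length = n) :
    phase2A n ans r = bestStepB ans r := by
  rw [bestStepB_eq_foldl_max]
  simp only [phase2A]
  set s := PySem.List.sorted r (fun x => x) true with hs
  have hperm : s.Perm r := PySem.List.sorted_perm r (fun x => x) true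
  have hpw : List.Pairwise (fun a b => b ≤ a) s := by
    simpa using PySem.List.sorted_pairwise_rev (α := Int) r (fun x => x)
  have hlen : s.length = r.length := PySem.List.length_sorted r (fun x => x) true
  have hcnt : ∀ h : Int, s.countP (fun x => decide (h ≤ x)) = r.countP (fun x => decide (h ≤ x)) :=
    fun h => hperm.countP_eq _
  have hA := PySem.List.le_foldl_max_int (List.range n)
    (fun i : Nat => PySem.List.pyGetD s (i : Int) 0 * ((i : Int) + 1)) ans
  have hB := PySem.List.le_foldl_max_int r
    (fun x : Int => x * (r.countP (fun y => decide (x ≤ y)) : Int)) ans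
  apply le_antisymm
  · apply foldl_max_le
    · exact hB.1
    · intro i hi
      have hin : i < n := List.mem_range.mp hi
      have hi' : i < s.length := by omega
      rw [PySem.List.pyGetD_natCast, List.getD_eq_getElem?_getD, List.getElem?_eq_getElem hi']
      simp only [Option.getD_some]
      by_cases hneg : s[i] ≤ 0
      · have h1 : s[i] * ((i : Int) + 1) ≤ 0 :=
          mul_nonpos_of_nonpos_of_nonneg hneg (by positivity)
        have := hB.1
        omega
      · have hpos : 0 < s[i] := by omega
        have hmem : s[i] ∈ r := hperm.mem_iff.mp (List.getElem_mem hi')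
        have hcount : i + 1 ≤ r.countP (fun x => decide (s[i] ≤ x)) := by
          rw [← hcnt]; exact count_ge_of_sorted_idx s hpw i hi'
        have h1 : s[i] * ((i : Int) + 1)
            ≤ s[i] * (r.countP (fun x => decide (s[i] ≤ x)) : Int) := by
          apply mul_le_mul_of_nonneg_left _ (le_of_lt hpos)
          exact_mod_cast hcount
        exact le_trans h1 (hB.2 _ hmem)
  · apply foldl_max_le
    · exact hA.1
    · intro x hmemr
      by_cases hneg : x ≤ 0
      · have h1 : x * (r.countP (fun y => decide (x ≤ y)) : Int) ≤ 0 :=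
          mul_nonpos_of_nonpos_of_nonneg hneg (by positivity)
        have := hA.1
        omega
      · have hpos : 0 < x := by omega
        set k := s.countP (fun y => decide (x ≤ y)) with hk
        have hk0 : 0 < k := by
          rw [hk, List.countP_pos_iff]
          exact ⟨x, hperm.mem_iff.mpr hmemr, by simp⟩
        have hklen : k ≤ s.length := List.countP_le_length
        have hjs : k - 1 < s.length := by omega
        have hgeh : x ≤ s[k-1] := sorted_getElem_count_ge s hpw x k hk hk0 hjs
        have hmemrange : k - 1 ∈ List.range n := by
          rw [List.mem_range]; omega
        have hAc := hA.2 _ hmemrange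
        have hval : PySem.List.pyGetD s ((k-1 : Nat) : Int) 0 = s[k-1] := by
          rw [PySem.List.pyGetD_natCast, List.getD_eq_getElem?_getD,
            List.getElem?_eq_getElem hjs]; rfl
        simp only at hAc
        rw [hval] at hAc
        have hcast : ((k - 1 : Nat) : Int) + 1 = (k : Int) := by omega
        rw [hcast] at hAc
        have h1 : x * (r.countP (fun y => decide (x ≤ y)) : Int) ≤ s[k-1] * (k : Int) := by
          rw [← hcnt, ← hk]
          exact mul_le_mul_of_nonneg_right hgeh (by positivity)
        exact le_trans h1 hAc

lemma chain_eq (n : Nat) (rest : List (List Int)) : ∀ (prev : List Int) (ans : Int),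
    0 ≤ ans → prev.length = n → (∀ r ∈ rest, r.length = n) →
    (chainA n prev rest).foldl (phase2A n) ans
      = (rest.foldl (fun (st : Int × List Int) row =>
          let heights := hStepB st.2 row
          (bestStepB st.1 heights, heights)) (ans, prev)).1 := by
  induction rest with
  | nil => intro prev ans _ _ _; simp [chainA]
  | cons row rest ih =>
      intro prev ans h0 hp hlen
      have hrow : row.length = n := hlen row (by simp)
      have hnr : rowUpdA n prev row = hStepB prev row := rowUpdA_eq_hStepB n prev row hp hrow
      have hlh : (hStepB prev row).length = n := length_hStepB prev row n hp hrow
      simp only [chainA, List.foldl_cons, hnr]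
      rw [phase2A_eq_bestStepB n ans (hStepB prev row) h0 hlh]
      exact ih (hStepB prev row) (bestStepB ans (hStepB prev row))
        (le_trans h0 (bestStepB_ge ans _)) hlh
        (fun r hr => hlen r (by simp [hr]))

-- width 0: A's inner scan is over range 0, so its fold never changes the accumulator
lemma largestSubmatrix_zero (matrix : List (List Int))
    (h : (matrix.headD []).length = 0) : largestSubmatrix matrix = 0 := by
  simp only [largestSubmatrix, h, List.range_zero, List.foldl_nil]
  generalize (match matrix with | [] => [] | r0 :: rest => accA 0 r0 rest) = acc
  induction acc with
  | nil => rfl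
  | cons r t ih => simp only [List.foldl_cons]; exact ih

-- width 0: B's heights stay [], so its best stays 0
lemma alt_fold_nil (rows : List (List Int)) : ∀ best : Int,
    (rows.foldl (fun (st : Int × List Int) row =>
      let heights := hStepB st.2 row
      (bestStepB st.1 heights, heights)) (best, [])).1 = best := by
  induction rows with
  | nil => intro best; rfl
  | cons r t ih =>
      intro best
      simp only [List.foldl_cons]
      rw [show hStepB [] r = [] by simp [hStepB]]
      exact ih best

lemma largestSubmatrix_alt_zero (matrix : List (List Int))
    (h : (matrix.headD []).length = 0) : largestSubmatrix_alt matrix = 0 := by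
  simp only [largestSubmatrix_alt, h, List.replicate_zero]
  exact alt_fold_nil matrix 0

-- ===== VERDICT (by name: the statement is the Claim_ definition above) =====
theorem largestSubmatrix_spec : Claim_equal_largestSubmatrix := by
  intro matrix _hdom hpre
  obtain ⟨hne, hzero | hlen⟩ := hpre
  · show largestSubmatrix matrix = largestSubmatrix_alt matrix
    rw [largestSubmatrix_zero matrix hzero, largestSubmatrix_alt_zero matrix hzero]
  match matrix with
  | [] => exact absurd rfl hne
  | r0 :: rest =>
    show largestSubmatrix (r0 :: rest) = largestSubmatrix_alt (r0 :: rest)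
    have hlen' : ∀ r ∈ rest, r.length = r0.length := by
      intro r hr
      simpa using hlen r (by simp [hr])
    rw [largestSubmatrix_cons_eq]
    simp only [largestSubmatrix_alt, List.headD_cons, List.foldl_cons]
    rw [hStepB_replicate r0]
    rw [show (phase2A r0.length 0 r0) = bestStepB 0 r0 from
      phase2A_eq_bestStepB r0.length 0 r0 le_rfl rfl]
    exact chain_eq r0.length rest r0 (bestStepB 0 r0)
      (le_trans le_rfl (bestStepB_ge 0 r0)) rfl hlen'
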